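-- pv_equiv track=rewrite | github.com/mammon2015/stockdata | data/extended.py | _assorted_max
-- ===== SOURCE A (Python) =====
-- def _assorted_max(lst2d, val_idx):
--     """ Return a dict with assorted key and max vlue index. """
--
--     # 如果是一个空列表，直接返回空字典
--     if len(lst2d) == 0: return dict()
--     # 二维表宽度必须大于比较列索引
--     if len(lst2d[0]) <= val_idx: raise ValueError("Wrong column index!")
--     idx = {}
--     for i, rec in enumerate(lst2d):
--         key, val = rec[0], rec[val_idx]
--         if key in idx.keys():
--             if lst2d[idx[key]][val_idx] < val: idx[key] = i
--         else:
--             idx[key] = i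
--     return idx
-- ===== SOURCE B (Python) =====
-- def _assorted_max(lst2d, val_idx):
--     """ Return a dict with assorted key and max vlue index. """
--     if len(lst2d) == 0: return dict()
--     if len(lst2d[0]) <= val_idx: raise ValueError("Wrong column index!")
--     groups = {}
--     for i, rec in enumerate(lst2d):
--         key = rec[0]
--         groups[key] = groups.get(key, []) + [i]
--     return {key: _argmax(lst2d, val_idx, ids) for key, ids in groups.items()}
--
--
-- def _argmax(lst2d, val_idx, ids):
--     """ First index in ids whose row has the maximal value in column val_idx. """
--     best = ids[0]
--     for j in ids[1:]:
--         if lst2d[best][val_idx] < lst2d[j][val_idx]: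
--             best = j
--     return best
-- ===== Notes on version B (the rewrite author's own statement) =====
-- stated objective: alternative
-- what changed: A interleaves grouping and maximisation in one pass that keeps only the current best index per key; B decomposes it into two phases: first group all row indices by key into a dict, then map a separate argmax helper over each group.
import Mathlib
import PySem

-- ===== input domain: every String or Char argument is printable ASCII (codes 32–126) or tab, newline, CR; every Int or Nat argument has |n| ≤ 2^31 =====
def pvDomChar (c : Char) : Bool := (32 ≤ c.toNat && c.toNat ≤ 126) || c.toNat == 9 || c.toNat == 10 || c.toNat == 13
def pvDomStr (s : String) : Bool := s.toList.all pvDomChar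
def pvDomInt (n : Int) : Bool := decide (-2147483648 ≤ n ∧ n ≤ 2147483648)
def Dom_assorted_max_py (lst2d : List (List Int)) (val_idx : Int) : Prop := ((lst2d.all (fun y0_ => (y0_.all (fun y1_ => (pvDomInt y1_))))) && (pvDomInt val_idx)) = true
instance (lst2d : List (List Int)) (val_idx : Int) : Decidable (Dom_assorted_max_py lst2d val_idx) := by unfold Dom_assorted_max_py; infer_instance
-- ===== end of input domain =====

-- B replaces A's single-pass compare-and-replace loop by a two-phase group-then-argmax decomposition
-- (same asymptotic cost; objective: alternative).

-- ===== PORT A =====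
-- Literal transliteration of _assorted_max: one dict of current best indices, updated in place.
-- Python raises (ValueError / IndexError) where the guards fail or an index is out of range; there
-- the port returns [] / uses pyGetD's default — those inputs are excluded by Pre_ below.
def assorted_max_py (lst2d : List (List Int)) (val_idx : Int) : List (Int × Int) :=
  if lst2d.length = 0 then [] else
  if (lst2d.headI.length : Int) ≤ val_idx then []   -- ValueError("Wrong column index!"), outside Pre_
  else
    ((PySem.List.enumerate lst2d 0).foldl (fun idx p =>
        let key := PySem.List.pyGetD p.2 0 0
        let v := PySem.List.pyGetD p.2 val_idx 0
        match idx.get? key with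
        | some j =>
            if PySem.List.pyGetD (PySem.List.pyGetD lst2d j []) val_idx 0 < v
            then idx.insert key p.1 else idx
        | none => idx.insert key p.1)
      (PySem.Dict.empty : PySem.Dict Int Int)).items

-- ===== PORT B =====
-- Port of Source B's helper _argmax: first index among ids whose row maximises column val_idx.
-- (Python's ids[0] raises on []; Source B never calls it with []; the [] branch returns 0.)
def pvArgmax (lst2d : List (List Int)) (val_idx : Int) (ids : List Int) : Int :=
  match ids with
  | [] => 0
  | h :: t =>
      t.foldl (fun b j =>
        if PySem.List.pyGetD (PySem.List.pyGetD lst2d b []) val_idx 0 <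
           PySem.List.pyGetD (PySem.List.pyGetD lst2d j []) val_idx 0
        then j else b) h

-- Literal transliteration of Source B: phase 1 groups row indices by key, phase 2 maps _argmax over the groups.
def assorted_max_py_alt (lst2d : List (List Int)) (val_idx : Int) : List (Int × Int) :=
  if lst2d.length = 0 then [] else
  if (lst2d.headI.length : Int) ≤ val_idx then []   -- ValueError("Wrong column index!"), outside Pre_
  else
    ((PySem.List.enumerate lst2d 0).foldl (fun g p =>
        g.insert (PySem.List.pyGetD p.2 0 0)
          (g.getD (PySem.List.pyGetD p.2 0 0) [] ++ [p.1]))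
      (PySem.Dict.empty : PySem.Dict Int (List Int))).items.map
      (fun q => (q.1, pvArgmax lst2d val_idx q.2))

-- ===== PRECONDITION & SPEC =====
-- Pre_ excludes exactly the inputs where Python A raises: ValueError when the first row is not wider
-- than val_idx, IndexError when some row is empty (rec[0]) or val_idx is out of range for some row.
def Pre_assorted_max_py (lst2d : List (List Int)) (val_idx : Int) : Prop :=
  ∀ rec ∈ lst2d, PySem.Raise.InRange rec.length 0 ∧ PySem.Raise.InRange rec.length val_idx
instance (lst2d : List (List Int)) (val_idx : Int) : Decidable (Pre_assorted_max_py lst2d val_idx) := by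
  unfold Pre_assorted_max_py; infer_instance

def pvWitness_assorted_max_py : List (List Int) × Int := ([[1, 5], [2, 3], [1, 7], [2, 9], [1, 7]], 1)

def Spec_assorted_max_py (lst2d : List (List Int)) (val_idx : Int) (out : List (Int × Int)) : Prop := out = assorted_max_py_alt lst2d val_idx
instance (lst2d : List (List Int)) (val_idx : Int) (out : List (Int × Int)) : Decidable (Spec_assorted_max_py lst2d val_idx out) := by unfold Spec_assorted_max_py; infer_instance

-- ===== CLAIM (what is proved, stated in full; the proofs are below) =====
def Claim_equal_assorted_max_py : Prop := ∀ (lst2d : List (List Int)) (val_idx : Int), Dom_assorted_max_py lst2d val_idx → Pre_assorted_max_py lst2d val_idx → Spec_assorted_max_py lst2d val_idx (assorted_max_py lst2d val_idx)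

-- ===== LEMMAS AND PROOFS =====

-- get? through a value-mapped items list
theorem pv_get?_map {ν ν' : Type} (f : ν → ν') (dA : PySem.Dict Int ν') (dG : PySem.Dict Int ν)
    (h : dA.items = dG.items.map (fun q => (q.1, f q.2))) (k : Int) :
    dA.get? k = (dG.get? k).map f := by
  obtain ⟨lA⟩ := dA
  obtain ⟨lG⟩ := dG
  simp only [] at h
  subst h
  induction lG with
  | nil => rfl
  | cons q t ih =>
      obtain ⟨k0, v0⟩ := q
      simp only [List.map_cons, PySem.Dict.get?_mk_cons]
      split <;> simp [ih]

theorem pv_get?_some_mem {ν : Type} (d : PySem.Dict Int ν) (k : Int) (v : ν)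
    (h : d.get? k = some v) : (k, v) ∈ d.items := by
  obtain ⟨l⟩ := d
  induction l with
  | nil => simp [PySem.Dict.get?] at h
  | cons q t ih =>
      obtain ⟨k0, v0⟩ := q
      rw [PySem.Dict.get?_mk_cons] at h
      by_cases hk : k0 = k
      · simp [hk] at h
        subst hk; subst h
        exact List.mem_cons_self ..
      · simp [hk] at h
        exact List.mem_cons_of_mem _ (ih h)

theorem pv_getD_eq {ν : Type} (d : PySem.Dict Int ν) (k : Int) (dflt : ν) :
    d.getD k dflt = (d.get? k).getD dflt := rfl

theorem pvArgmax_append (lst2d : List (List Int)) (val_idx : Int) (ids : List Int) (i : Int)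
    (h : ids ≠ []) :
    pvArgmax lst2d val_idx (ids ++ [i]) =
      if PySem.List.pyGetD (PySem.List.pyGetD lst2d (pvArgmax lst2d val_idx ids) []) val_idx 0 <
         PySem.List.pyGetD (PySem.List.pyGetD lst2d i []) val_idx 0
      then i else pvArgmax lst2d val_idx ids := by
  match ids with
  | [] => exact absurd rfl h
  | h₀ :: t => simp [pvArgmax, List.foldl_append]

-- main invariant: A's running-best dict is the argmax image of B's groups dict
theorem pv_fold_rel (lst2d : List (List Int)) (val_idx : Int)
    (ps : List (Int × List Int))
    (hps : ∀ p ∈ ps, PySem.List.pyGetD lst2d p.1 [] = p.2)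
    (dA : PySem.Dict Int Int) (dG : PySem.Dict Int (List Int))
    (hnd : dG.keys.Nodup)
    (hne : ∀ q ∈ dG.items, q.2 ≠ ([] : List Int))
    (hitems : dA.items = dG.items.map (fun q => (q.1, pvArgmax lst2d val_idx q.2))) :
    (ps.foldl (fun idx p =>
        match idx.get? (PySem.List.pyGetD p.2 0 0) with
        | some j =>
            if PySem.List.pyGetD (PySem.List.pyGetD lst2d j []) val_idx 0 <
               PySem.List.pyGetD p.2 val_idx 0
            then idx.insert (PySem.List.pyGetD p.2 0 0) p.1 else idx
        | none => idx.insert (PySem.List.pyGetD p.2 0 0) p.1) dA).items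
    = ((ps.foldl (fun g p =>
        g.insert (PySem.List.pyGetD p.2 0 0)
          (g.getD (PySem.List.pyGetD p.2 0 0) [] ++ [p.1])) dG).items).map
        (fun q => (q.1, pvArgmax lst2d val_idx q.2)) := by
  induction ps generalizing dA dG with
  | nil => simpa using hitems
  | cons p ps ih =>
      have hp : PySem.List.pyGetD lst2d p.1 [] = p.2 := hps p (List.mem_cons_self ..)
      have hps' : ∀ q ∈ ps, PySem.List.pyGetD lst2d q.1 [] = q.2 :=
        fun q hq => hps q (List.mem_cons_of_mem _ hq)
      simp only [List.foldl_cons]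
      have hget := pv_get?_map (pvArgmax lst2d val_idx) dA dG hitems (PySem.List.pyGetD p.2 0 0)
      cases hG : dG.get? (PySem.List.pyGetD p.2 0 0) with
      | none =>
          have hA : dA.get? (PySem.List.pyGetD p.2 0 0) = none := by rw [hget, hG]; rfl
          have hcG : dG.contains (PySem.List.pyGetD p.2 0 0) = false :=
            (PySem.Dict.get?_eq_none_iff_contains dG _).mp hG
          have hcA : dA.contains (PySem.List.pyGetD p.2 0 0) = false :=
            (PySem.Dict.get?_eq_none_iff_contains dA _).mp hA
          have hGd : dG.getD (PySem.List.pyGetD p.2 0 0) [] = [] := by rw [pv_getD_eq, hG]; rfl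
          simp only [hA]
          refine ih hps' _ _
            (PySem.Dict.nodup_keys_insert _ _ _ hnd) ?_ ?_
          · intro q hq
            rw [PySem.Dict.items_insert_of_not_contains _ _ hcG] at hq
            rcases List.mem_append.mp hq with hq | hq
            · exact hne q hq
            · simp only [List.mem_singleton] at hq; rw [hq]; simp
          · rw [PySem.Dict.items_insert_of_not_contains _ _ hcA,
                PySem.Dict.items_insert_of_not_contains _ _ hcG,
                List.map_append, hitems, hGd]
            rfl
      | some is =>
          have hA : dA.get? (PySem.List.pyGetD p.2 0 0) = some (pvArgmax lst2d val_idx is) := by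
            rw [hget, hG]; rfl
          have hcG : dG.contains (PySem.List.pyGetD p.2 0 0) = true := by
            cases hc : dG.contains (PySem.List.pyGetD p.2 0 0)
            · rw [← PySem.Dict.get?_eq_none_iff_contains] at hc; rw [hc] at hG; cases hG
            · rfl
          have hcA : dA.contains (PySem.List.pyGetD p.2 0 0) = true := by
            cases hc : dA.contains (PySem.List.pyGetD p.2 0 0)
            · rw [← PySem.Dict.get?_eq_none_iff_contains] at hc; rw [hc] at hA; cases hA
            · rfl
          have hGd : dG.getD (PySem.List.pyGetD p.2 0 0) [] = is := by rw [pv_getD_eq, hG]; rfl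
          have hisne : is ≠ [] := hne _ (pv_get?_some_mem dG _ is hG)
          have huniq : ∀ q ∈ dG.items, q.1 = PySem.List.pyGetD p.2 0 0 →
              q = (PySem.List.pyGetD p.2 0 0, is) := by
            intro q hq hq1
            have hmem : (PySem.List.pyGetD p.2 0 0, is) ∈ dG.items := pv_get?_some_mem dG _ is hG
            have hnodup : (dG.items.map Prod.fst).Nodup := hnd
            have := List.inj_on_of_nodup_map hnodup hq hmem (by simp [hq1])
            cases q; simp_all
          have hval : PySem.List.pyGetD (PySem.List.pyGetD lst2d p.1 []) val_idx 0
              = PySem.List.pyGetD p.2 val_idx 0 := by rw [hp]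
          have hnd' := PySem.Dict.nodup_keys_insert dG (PySem.List.pyGetD p.2 0 0)
            (dG.getD (PySem.List.pyGetD p.2 0 0) [] ++ [p.1]) hnd
          have hne' : ∀ q ∈ (dG.insert (PySem.List.pyGetD p.2 0 0)
              (dG.getD (PySem.List.pyGetD p.2 0 0) [] ++ [p.1])).items, q.2 ≠ ([] : List Int) := by
            intro q hq
            rw [PySem.Dict.items_insert_of_contains _ _ hcG] at hq
            rcases List.mem_map.mp hq with ⟨q', hq', hqe⟩
            by_cases h1 : q'.1 = PySem.List.pyGetD p.2 0 0
            · simp [h1, hGd] at hqe; rw [← hqe]; simp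
            · simp [h1] at hqe; rw [← hqe]; exact hne _ hq'
          simp only [hA]
          by_cases hlt : PySem.List.pyGetD (PySem.List.pyGetD lst2d (pvArgmax lst2d val_idx is) []) val_idx 0 <
              PySem.List.pyGetD p.2 val_idx 0
          · rw [if_pos hlt]
            refine ih hps' _ _ hnd' hne' ?_
            rw [PySem.Dict.items_insert_of_contains _ _ hcA,
                PySem.Dict.items_insert_of_contains _ _ hcG, hitems, hGd,
                List.map_map, List.map_map]
            refine List.map_congr_left ?_
            intro q hq
            simp only [Function.comp]
            by_cases h1 : q.1 = PySem.List.pyGetD p.2 0 0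
            · have hq2 := huniq q hq h1
              subst hq2
              simp only [beq_self_eq_true, if_true]
              rw [pvArgmax_append lst2d val_idx is p.1 hisne, hval, if_pos hlt]
            · simp [h1]
          · rw [if_neg hlt]
            refine ih hps' _ _ hnd' hne' ?_
            rw [PySem.Dict.items_insert_of_contains _ _ hcG, hitems, hGd, List.map_map]
            refine List.map_congr_left ?_
            intro q hq
            simp only [Function.comp]
            by_cases h1 : q.1 = PySem.List.pyGetD p.2 0 0
            · have hq2 := huniq q hq h1
              subst hq2
              simp only [beq_self_eq_true, if_true]
              rw [pvArgmax_append lst2d val_idx is p.1 hisne, hval, if_neg hlt]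
            · simp [h1]

theorem pv_enum_rows (lst2d : List (List Int)) :
    ∀ p ∈ PySem.List.enumerate lst2d 0, PySem.List.pyGetD lst2d p.1 [] = p.2 := by
  intro p hp
  rcases (PySem.List.mem_enumerate_iff lst2d 0 p).mp hp with ⟨k, hk, hpe⟩
  subst hpe
  simp only [zero_add]
  rw [PySem.List.pyGetD_natCast]
  simp [List.getD_eq_getElem?_getD, hk]

-- ===== VERDICT (by name: the statement is the Claim_ definition above) =====
theorem assorted_max_py_spec : Claim_equal_assorted_max_py := by
  intro lst2d val_idx _hdom _hpre
  unfold Spec_assorted_max_py assorted_max_py assorted_max_py_alt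
  split
  · rfl
  split
  · rfl
  exact pv_fold_rel lst2d val_idx (PySem.List.enumerate lst2d 0) (pv_enum_rows lst2d)
    PySem.Dict.empty PySem.Dict.empty (by simp [PySem.Dict.empty, PySem.Dict.keys])
    (by intro q hq; simp [PySem.Dict.empty] at hq) rfl
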